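-- pv_equiv track=rewrite | github.com/marcuslissner/AoC25 | day3.py | get_joltage
-- ===== SOURCE A (Python) =====
-- def get_joltage(battery_bank: list[int]):
--     tens_val = battery_bank[0]
--     tens_idx = 0
--     ones_val = battery_bank[1]
--     ones_idx = 1
--     last_idx = len(battery_bank) - 1
--
--     for idx, battery in enumerate(battery_bank):
--         if idx < last_idx and idx > tens_idx and battery > tens_val:
--             tens_val = battery
--             tens_idx = idx
--             ones_val = battery_bank[idx + 1]
--             ones_idx = idx + 1
--         if idx > 0 and idx > ones_idx and idx > tens_idx and battery > ones_val:
--             ones_val = battery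
--             ones_idx = idx
--
--     return int(str(tens_val) + str(ones_val))
-- ===== SOURCE B (Python) =====
-- def get_joltage(battery_bank: list[int]):
--     tens_val = max(battery_bank[:-1])
--     tens_idx = battery_bank.index(tens_val)
--     ones_val = max(battery_bank[tens_idx + 1:])
--     return int(str(tens_val) + str(ones_val))
-- ===== Notes on version B (the rewrite author's own statement) =====
-- stated objective: simpler
-- what changed: A's single interleaved loop that tracks tens/ones candidates with index bookkeeping is replaced by two slice-based max scans plus a first-index lookup: tens = max(bank[:-1]), ones = max(bank[bank.index(tens)+1:]).
-- outside the precondition, e.g. on get_joltage([1]): A raises IndexError, B raises ValueError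
import Mathlib
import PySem

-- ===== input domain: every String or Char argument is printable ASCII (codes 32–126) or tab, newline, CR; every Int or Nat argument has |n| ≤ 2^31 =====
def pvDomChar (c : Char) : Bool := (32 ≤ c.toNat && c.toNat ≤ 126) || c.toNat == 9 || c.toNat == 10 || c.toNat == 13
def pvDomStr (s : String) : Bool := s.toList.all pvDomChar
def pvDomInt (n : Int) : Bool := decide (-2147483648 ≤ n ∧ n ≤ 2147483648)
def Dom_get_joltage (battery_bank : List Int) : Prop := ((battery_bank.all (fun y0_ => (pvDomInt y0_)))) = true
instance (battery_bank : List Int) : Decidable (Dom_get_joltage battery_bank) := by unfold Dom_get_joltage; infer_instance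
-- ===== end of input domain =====

-- B replaces A's single interleaved tracking loop by two slice-based max scans plus a first-index lookup (simpler decomposition, same cost).

-- ===== PORT A =====
-- loop body of A's for-loop: state (tens_val, tens_idx, ones_val, ones_idx), p = (idx, battery)
def stepA (bank : List Int) (last_idx : Int) (s : Int × Int × Int × Int) (p : Int × Int) :
    Int × Int × Int × Int :=
  let s1 := if p.1 < last_idx ∧ p.1 > s.2.1 ∧ p.2 > s.1
    then (p.2, p.1, (PySem.List.pyGet? bank (p.1 + 1)).getD 0, p.1 + 1)
    else s
  if p.1 > 0 ∧ p.1 > s1.2.2.2 ∧ p.1 > s1.2.1 ∧ p.2 > s1.2.2.1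
    then (s1.1, s1.2.1, p.2, p.1)
    else s1

def get_joltage (battery_bank : List Int) : Int :=
  -- battery_bank[0] / battery_bank[1] raise IndexError for short input (excluded by Pre_); .getD 0 is a placeholder there
  let tens_val := (PySem.List.pyGet? battery_bank 0).getD 0
  let ones_val := (PySem.List.pyGet? battery_bank 1).getD 0
  let last_idx : Int := (battery_bank.length : Int) - 1
  let st := (PySem.List.enumerate battery_bank).foldl (stepA battery_bank last_idx)
    (tens_val, 0, ones_val, 1)
  -- int(str(tens_val) + str(ones_val)); none = ValueError, excluded by Pre_
  (PySem.Int.ofStr? (PySem.Int.toStr st.1 ++ PySem.Int.toStr st.2.2.1)).getD 0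

-- ===== PORT B =====
def get_joltage_alt (battery_bank : List Int) : Int :=
  -- tens_val = max(battery_bank[:-1]); ValueError on empty slice excluded by Pre_
  let tens_val := (PySem.List.max? (PySem.List.slice battery_bank none (some (-1))) (fun y => y)).getD 0
  -- tens_idx = battery_bank.index(tens_val)
  let tens_idx : Int := ((PySem.List.index? battery_bank tens_val).getD 0 : Nat)
  -- ones_val = max(battery_bank[tens_idx + 1:])
  let ones_val := (PySem.List.max? (PySem.List.slice battery_bank (some (tens_idx + 1)) none) (fun y => y)).getD 0
  (PySem.Int.ofStr? (PySem.Int.toStr tens_val ++ PySem.Int.toStr ones_val)).getD 0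

-- ===== PRECONDITION & SPEC =====
-- Pre_ excludes inputs where the Python A raises: lists of length < 2 (IndexError at
-- battery_bank[1]) and lists where every element after the first maximum of
-- battery_bank[:-1] is negative (ones_val < 0 makes int(str(tens_val)+str(ones_val))
-- a ValueError).  j below is the first index attaining the maximum of battery_bank[:-1].
def Pre_get_joltage (battery_bank : List Int) : Prop :=
  2 ≤ battery_bank.length ∧
  ∃ j < battery_bank.length - 1,
    (∀ i < j, battery_bank[i]! < battery_bank[j]!) ∧
    (∀ i < battery_bank.length - 1, battery_bank[i]! ≤ battery_bank[j]!) ∧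
    ∃ k < battery_bank.length, j < k ∧ 0 ≤ battery_bank[k]!
instance (battery_bank : List Int) : Decidable (Pre_get_joltage battery_bank) := by
  unfold Pre_get_joltage; infer_instance

def pvWitness_get_joltage : List Int := [3, 5]

def Spec_get_joltage (battery_bank : List Int) (out : Int) : Prop := out = get_joltage_alt battery_bank
instance (battery_bank : List Int) (out : Int) : Decidable (Spec_get_joltage battery_bank out) := by unfold Spec_get_joltage; infer_instance

-- ===== CLAIM (what is proved, stated in full; the proofs are below) =====
def Claim_equal_get_joltage : Prop := ∀ (battery_bank : List Int), Dom_get_joltage battery_bank → Pre_get_joltage battery_bank → Spec_get_joltage battery_bank (get_joltage battery_bank)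


-- ===== LEMMAS AND PROOFS =====

-- Loop invariant of A's pass, after the elements with indices < k have been processed
-- (k ≥ 2; the iterations at idx 0 and 1 are folded into the initial state):
-- tens_idx = j is the FIRST index attaining the maximum of bank[: min k (len-1)], and
-- ones_idx = q attains the maximum of bank[j+1 : max k (j+2)]
-- (when tens was just updated at j = k-1, A has already read ones = bank[j+1] ahead).
def InvJ (bank : List Int) (k : Nat) (s : Int × Int × Int × Int) : Prop :=
  ∃ j q : Nat,
    s.2.1 = (j : Int) ∧ s.1 = bank[j]! ∧
    j < min k (bank.length - 1) ∧
    (∀ i < j, bank[i]! < bank[j]!) ∧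
    (∀ i < min k (bank.length - 1), bank[i]! ≤ bank[j]!) ∧
    s.2.2.2 = (q : Int) ∧ s.2.2.1 = bank[q]! ∧
    j + 1 ≤ q ∧ q < max k (j + 2) ∧
    (∀ i, j + 1 ≤ i → i < max k (j + 2) → bank[i]! ≤ bank[q]!)

lemma pyGetD_bang (bank : List Int) (m : Nat) (hm : m < bank.length) :
    (PySem.List.pyGet? bank (m : Int)).getD 0 = bank[m]! := by
  rw [PySem.List.pyGet?_natCast, List.getElem?_eq_getElem hm, Option.getD_some,
    getElem!_pos bank m hm]

lemma stepA_preserves (bank : List Int) (k : Nat) (h2 : 2 ≤ k) (hk : k < bank.length)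
    (s : Int × Int × Int × Int) (hInv : InvJ bank k s) :
    InvJ bank (k + 1) (stepA bank ((bank.length : Int) - 1) s ((k : Int), bank[k]!)) := by
  obtain ⟨tv, ti, ov, oi⟩ := s
  obtain ⟨j, q, hsj, hstv, hjlt, hjmax1, hjmax2, hsq, hsov, hq1, hq2, hqmax2⟩ := hInv
  simp only at hsj hstv hsq hsov
  subst hsj hstv hsq hsov
  have hjk : j < k := by omega
  unfold stepA
  by_cases hC1 : (k : Int) < (bank.length : Int) - 1 ∧ (k : Int) > (j : Int) ∧
      bank[k]! > bank[j]!
  · -- tens updated at idx k; then the second if is skipped (idx > tens_idx fails)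
    have hkn : k < bank.length - 1 := by omega
    rw [if_pos hC1]
    simp only
    rw [if_neg (by omega)]
    refine ⟨k, k + 1, by simp, by simp, by omega, ?_, ?_, by simp, ?_, by omega, by omega, ?_⟩
    · intro i hi
      exact lt_of_le_of_lt (hjmax2 i (by omega)) hC1.2.2
    · intro i hi
      rcases Nat.lt_or_ge i k with h | h
      · exact le_of_lt (lt_of_le_of_lt (hjmax2 i (by omega)) hC1.2.2)
      · have : i = k := by omega
        subst this; exact le_refl _
    · have hc : ((k : Int) + 1) = ((k + 1 : Nat) : Int) := by omega
      rw [hc, pyGetD_bang bank (k + 1) (by omega)]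
    · intro i h1 h2'
      have : i = k + 1 := by omega
      subst this; exact le_refl _
  · rw [if_neg hC1]
    simp only
    have hnc1 : ¬ ((k : Int) < (bank.length : Int) - 1) ∨ ¬ (bank[k]! > bank[j]!) := by
      by_cases ha : (k : Int) < (bank.length : Int) - 1
      · right; intro hb; exact hC1 ⟨ha, by omega, hb⟩
      · left; exact ha
    by_cases hC2 : (k : Int) > 0 ∧ (k : Int) > (q : Int) ∧ (k : Int) > (j : Int) ∧
        bank[k]! > bank[q]!
    · -- ones updated at idx k
      rw [if_pos hC2]
      have hqk : q < k := by
        have := hC2.2.1; omega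
      refine ⟨j, k, rfl, rfl, by omega, hjmax1, ?_, rfl, rfl, by omega, by omega, ?_⟩
      · intro i hi
        rcases Nat.lt_or_ge i (min k (bank.length - 1)) with h | h
        · exact hjmax2 i h
        · have hik : i = k := by omega
          have hkn : k < bank.length - 1 := by omega
          subst hik
          rcases hnc1 with h' | h'
          · exact absurd (by omega) h'
          · omega
      · intro i h1 h2'
        rcases Nat.lt_or_ge i k with h | h
        · exact le_of_lt (lt_of_le_of_lt (hqmax2 i h1 (by omega)) hC2.2.2.2)
        · have : i = k := by omega
          subst this; exact le_refl _
    · rw [if_neg hC2]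
      refine ⟨j, q, rfl, rfl, by omega, hjmax1, ?_, rfl, rfl, hq1, by omega, ?_⟩
      · intro i hi
        rcases Nat.lt_or_ge i (min k (bank.length - 1)) with h | h
        · exact hjmax2 i h
        · have hik : i = k := by omega
          have hkn : k < bank.length - 1 := by omega
          subst hik
          rcases hnc1 with h' | h'
          · exact absurd (by omega) h'
          · omega
      · intro i h1 h2'
        rcases Nat.lt_or_ge i (max k (j + 2)) with h | h
        · exact hqmax2 i h1 h
        · have hik : i = k := by omega
          have hqk : q < k := by omega
          have hng : ¬ (bank[k]! > bank[q]!) := by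
            intro hgt
            exact hC2 ⟨by omega, by omega, by omega, hgt⟩
          rw [hik]
          omega

lemma loop_inv (bank : List Int) : ∀ (d k : Nat) (s : Int × Int × Int × Int),
    k + d = bank.length → 2 ≤ k → InvJ bank k s →
    InvJ bank bank.length
      (List.foldl (stepA bank ((bank.length : Int) - 1)) s
        (PySem.List.enumerate (bank.drop k) (k : Int))) := by
  intro d
  induction d with
  | zero =>
    intro k s hkd h2 hInv
    have hk : k = bank.length := by omega
    subst hk
    simp [PySem.List.enumerate_nil]
    exact hInv
  | succ d ih =>
    intro k s hkd h2 hInv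
    have hk : k < bank.length := by omega
    rw [List.drop_eq_getElem_cons hk, PySem.List.enumerate_cons, List.foldl_cons]
    have h1 : ((k : Int) + 1) = ((k + 1 : Nat) : Int) := by omega
    have h2' : bank[k] = bank[k]! := (getElem!_pos bank k hk).symm
    rw [h1, h2']
    exact ih (k + 1) _ (by omega) (by omega) (stepA_preserves bank k h2 hk s hInv)

lemma init_inv (bank : List Int) (h2 : 2 ≤ bank.length) :
    InvJ bank 2
      (stepA bank ((bank.length : Int) - 1)
        (stepA bank ((bank.length : Int) - 1) ((bank[0]!, 0, bank[1]!, 1) : Int × Int × Int × Int) (0, bank[0]!))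
        (1, bank[1]!)) := by
  have hstep0 : stepA bank ((bank.length : Int) - 1) ((bank[0]!, 0, bank[1]!, 1) : Int × Int × Int × Int) (0, bank[0]!) =
      ((bank[0]!, 0, bank[1]!, 1) : Int × Int × Int × Int) := by
    unfold stepA
    rw [if_neg (by simp), if_neg (by simp)]
  rw [hstep0]
  unfold stepA
  by_cases hC1 : (1 : Int) < (bank.length : Int) - 1 ∧ (1 : Int) > (0 : Int) ∧
      bank[1]! > bank[0]!
  · rw [if_pos hC1]
    simp only
    rw [if_neg (by norm_num)]
    have h3 : 2 < bank.length := by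
      have := hC1.1; omega
    refine ⟨1, 2, by simp, by simp, by omega, ?_, ?_, by simp, ?_, by omega, by omega, ?_⟩
    · intro i hi
      have : i = 0 := by omega
      subst this; exact hC1.2.2
    · intro i hi
      rcases Nat.lt_or_ge i 1 with h | h
      · have : i = 0 := by omega
        subst this; exact le_of_lt hC1.2.2
      · have : i = 1 := by omega
        subst this; exact le_refl _
    · show (PySem.List.pyGet? bank ((1 : Int) + 1)).getD 0 = bank[2]!
      have : ((1 : Int) + 1) = ((2 : Nat) : Int) := by norm_num
      rw [this, pyGetD_bang bank 2 h3]
    · intro i h1 h2'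
      have : i = 2 := by omega
      subst this; exact le_refl _
  · rw [if_neg hC1]
    simp only
    rw [if_neg (by norm_num)]
    have hn : ¬ ((1 : Int) < (bank.length : Int) - 1) ∨ ¬ (bank[1]! > bank[0]!) := by
      by_cases ha : (1 : Int) < (bank.length : Int) - 1
      · right; intro hb; exact hC1 ⟨ha, by norm_num, hb⟩
      · left; exact ha
    refine ⟨0, 1, by simp, by simp, by omega, by omega, ?_, by simp, by simp, by omega,
      by omega, ?_⟩
    · intro i hi
      rcases Nat.lt_or_ge i 1 with h | h
      · have : i = 0 := by omega
        subst this; exact le_refl _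
      · have hi1 : i = 1 := by omega
        subst hi1
        have h3 : 2 < bank.length := by omega
        rcases hn with h' | h'
        · exact absurd (by omega) h'
        · omega
    · intro i h1 h2'
      have : i = 1 := by omega
      subst this; exact le_refl _

-- max(l) (no key) returns the value at any index j that is a maximum of l
lemma max_of_argmax (l : List Int) (j : Nat) (hj : j < l.length)
    (hmax : ∀ i < l.length, l[i]! ≤ l[j]!) :
    PySem.List.max? l (fun y => y) = some (l[j]!) := by
  have hne : l ≠ [] := by
    intro h; subst h; simp at hj
  obtain ⟨m, hm⟩ : ∃ m, PySem.List.max? l (fun y => y) = some m := by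
    rcases h : PySem.List.max? l (fun y => y) with _ | m
    · exact absurd ((PySem.List.max?_eq_none_iff l (fun y => y)).mp h) hne
    · exact ⟨m, rfl⟩
  rw [hm]
  have hmem := PySem.List.max?_mem hm
  obtain ⟨i, hi, hie⟩ := List.mem_iff_getElem.mp hmem
  have h1 : m ≤ l[j]! := by
    rw [← hie, ← getElem!_pos l i hi]
    exact hmax i hi
  have h2 : l[j]! ≤ m := by
    have := PySem.List.max?_isMax hm l[j] (l.getElem_mem hj)
    rw [getElem!_pos l j hj]
    exact this
  exact congrArg some (le_antisymm h2 h1).symm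

lemma index_of_first (l : List Int) (j : Nat) (hj : j < l.length)
    (hstrict : ∀ i < j, l[i]! < l[j]!) :
    PySem.List.index? l l[j]! = some j := by
  rw [PySem.List.index?_eq_some_iff]
  refine ⟨l.take j, l.drop (j + 1), ?_, ?_, ?_⟩
  · conv_lhs => rw [← List.take_append_drop j l]
    rw [List.drop_eq_getElem_cons hj, getElem!_pos l j hj]
  · exact List.length_take_of_le (by omega)
  · intro hmem
    obtain ⟨i, hi, hie⟩ := List.mem_iff_getElem.mp hmem
    have hij : i < j := by
      have := l.length_take_of_le (le_of_lt hj)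
      omega
    have : (l.take j)[i] = l[i] := List.getElem_take
    rw [this, ← getElem!_pos l i (by omega)] at hie
    exact absurd hie (ne_of_lt (hstrict i hij))

-- ===== VERDICT (by name: the statement is the Claim_ definition above) =====
theorem get_joltage_spec : Claim_equal_get_joltage := by
  intro bank _ hPre
  obtain ⟨hlen, -⟩ := hPre
  unfold Spec_get_joltage get_joltage get_joltage_alt
  simp only
  -- decompose the fold over enumerate: first two iterations explicitly
  have h0 : 0 < bank.length := by omega
  have h1 : 1 < bank.length := by omega
  have e0 : bank.drop 0 = bank[0] :: bank.drop 1 := List.drop_eq_getElem_cons h0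
  have e1 : bank.drop 1 = bank[1] :: bank.drop 2 := List.drop_eq_getElem_cons h1
  rw [List.drop_zero] at e0
  have hdec : bank = bank[0]! :: bank[1]! :: bank.drop 2 := by
    rw [getElem!_pos bank 0 h0, getElem!_pos bank 1 h1, ← e1, ← e0]
  have henum : PySem.List.enumerate bank 0 =
      ((0 : Int), bank[0]!) :: ((1 : Int), bank[1]!) ::
        PySem.List.enumerate (bank.drop 2) (2 : Int) := by
    conv_lhs => rw [hdec]
    rw [PySem.List.enumerate_cons, PySem.List.enumerate_cons]
    norm_num
  have h00 : (PySem.List.pyGet? bank 0).getD 0 = bank[0]! := by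
    rw [show (0 : Int) = ((0 : Nat) : Int) by norm_num]
    exact pyGetD_bang bank 0 h0
  have h01 : (PySem.List.pyGet? bank 1).getD 0 = bank[1]! := by
    rw [show (1 : Int) = ((1 : Nat) : Int) by norm_num]
    exact pyGetD_bang bank 1 h1
  rw [h00, h01, henum, List.foldl_cons, List.foldl_cons]
  have hfin : InvJ bank bank.length
      (List.foldl (stepA bank ((bank.length : Int) - 1))
        (stepA bank ((bank.length : Int) - 1)
          (stepA bank ((bank.length : Int) - 1) ((bank[0]!, 0, bank[1]!, 1) : Int × Int × Int × Int) (0, bank[0]!))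
          (1, bank[1]!))
        (PySem.List.enumerate (bank.drop 2) ((2 : Nat) : Int))) :=
    loop_inv bank (bank.length - 2) 2 _ (by omega) (by omega) (init_inv bank hlen)
  have hcast : ((2 : Nat) : Int) = (2 : Int) := by norm_num
  rw [hcast] at hfin
  obtain ⟨j, q, hsj, hstv, hjlt, hjmax1, hjmax2, hsq, hsov, hq1, hq2, hqmax2⟩ := hfin
  rw [hstv, hsov]
  -- B's tens_val is bank[j]!
  have hjn : j < bank.length - 1 := by omega
  have htvB : PySem.List.max? (PySem.List.slice bank none (some (-1))) (fun y => y) =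
      some bank[j]! := by
    rw [PySem.List.slice_to_neg_one]
    have hjd : j < bank.dropLast.length := by
      rw [List.length_dropLast]; omega
    have hget : bank.dropLast[j]! = bank[j]! := by
      rw [getElem!_pos _ j hjd, getElem!_pos bank j (by omega), List.getElem_dropLast]
    rw [← hget]
    apply max_of_argmax _ _ hjd
    intro i hi
    have hid : i < bank.length - 1 := by
      rw [List.length_dropLast] at hi; omega
    have hgi : bank.dropLast[i]! = bank[i]! := by
      rw [getElem!_pos _ i hi, getElem!_pos bank i (by omega), List.getElem_dropLast]
    rw [hgi, hget]
    exact hjmax2 i (by omega)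
  -- B's tens_idx is j
  have hidxB : PySem.List.index? bank bank[j]! = some j :=
    index_of_first bank j (by omega) (fun i hi => hjmax1 i hi)
  rw [htvB, Option.getD_some, hidxB, Option.getD_some]
  -- B's ones_val is bank[q]!
  have hj2 : j + 2 ≤ bank.length := by omega
  have hqn : q < bank.length := by omega
  have hqmax : ∀ i, j + 1 ≤ i → i < bank.length → bank[i]! ≤ bank[q]! := by
    intro i ha hb
    exact hqmax2 i ha (by omega)
  have hovB : PySem.List.max? (PySem.List.slice bank (some ((j : Nat) + 1 : Int)) none)
      (fun y => y) = some bank[q]! := by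
    have hcast2 : ((j : Nat) + 1 : Int) = ((j + 1 : Nat) : Int) := by omega
    rw [hcast2, PySem.List.slice_from_natCast]
    have hql : q - (j + 1) < (bank.drop (j + 1)).length := by
      rw [List.length_drop]; omega
    have hgq : (bank.drop (j + 1))[q - (j + 1)]! = bank[q]! := by
      rw [getElem!_pos (bank.drop (j + 1)) (q - (j + 1)) hql, getElem!_pos bank q hqn, List.getElem_drop]
      congr 1; omega
    rw [← hgq]
    apply max_of_argmax _ _ hql
    intro i hi
    have hil : i < bank.length - (j + 1) := by
      rw [List.length_drop] at hi; omega
    have hgi : (bank.drop (j + 1))[i]! = bank[j + 1 + i]! := by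
      rw [getElem!_pos (bank.drop (j + 1)) i hi, getElem!_pos bank (j + 1 + i) (by omega), List.getElem_drop]
    rw [hgi, hgq]
    exact hqmax (j + 1 + i) (by omega) (by omega)
  rw [hovB, Option.getD_some]
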